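-- pv_equiv track=rewrite | github.com/MiaoWuDog/yunufeNetwork | login.py | sencode
-- ===== SOURCE A (Python) =====
-- def ordat(msg: str, idx: int) -> int:
--     return ord(msg[idx]) if len(msg) > idx else 0
--
-- def sencode(msg: str, key: bool) -> list:
--     """将字符串编码为整数数组"""
--     l = len(msg)
--     pwd = []
--     for i in range(0, l, 4):
--         pwd.append(
--             ordat(msg, i) | ordat(msg, i + 1) << 8 | ordat(msg, i + 2) << 16
--             | ordat(msg, i + 3) << 24)
--     if key:
--         pwd.append(l)
--     return pwd
-- ===== SOURCE B (Python) =====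
-- def sencode(msg: str, key: bool) -> list:
--     """将字符串编码为整数数组"""
--     # Accumulate the whole message into ONE big integer (little-endian, Horner
--     # from the right), then peel off 32-bit words arithmetically.
--     total = 0
--     for c in reversed(msg):
--         total = (total << 8) | ord(c)
--     pwd = []
--     for _ in range((len(msg) + 3) // 4):
--         pwd.append(total & 0xFFFFFFFF)
--         total >>= 32
--     if key:
--         pwd.append(len(msg))
--     return pwd
-- ===== Notes on version B (the rewrite author's own statement) =====
-- stated objective: alternative
-- what changed: A builds each 32-bit word separately by probing four bounds-checked character positions per word; B never chunks the string at all: it Horner-folds the whole message into one big little-endian integer and then peels off the 32-bit words by masking and shifting that single accumulator (slower than A on very long strings because of big-integer arithmetic).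
import Mathlib
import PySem

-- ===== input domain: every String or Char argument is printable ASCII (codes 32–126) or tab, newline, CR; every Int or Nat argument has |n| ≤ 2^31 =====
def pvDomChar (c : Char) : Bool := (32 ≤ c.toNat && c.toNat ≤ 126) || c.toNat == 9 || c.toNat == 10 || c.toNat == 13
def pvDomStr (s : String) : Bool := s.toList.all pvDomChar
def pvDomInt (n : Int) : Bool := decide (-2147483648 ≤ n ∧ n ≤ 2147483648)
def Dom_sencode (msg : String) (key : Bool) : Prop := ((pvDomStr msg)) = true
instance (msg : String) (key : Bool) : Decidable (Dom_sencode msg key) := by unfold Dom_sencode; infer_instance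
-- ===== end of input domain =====

-- B never chunks the string: it Horner-folds the whole message into one big
-- little-endian integer and then peels off 32-bit words by mask-and-shift
-- (objective: alternative; same values on the stated ASCII domain; B pays
-- quadratic bit-operation cost on very long strings, A stays linear).

-- ===== PORT A =====
-- ord(msg[idx]) if len(msg) > idx else 0
def ordat (msg : String) (idx : Int) : Int :=
  if (msg.length : Int) > idx then
    match PySem.Str.pyGet? msg idx with
    | some c => (c.toNat : Int)
    | none => 0   -- unreachable: the guard ensures 0 ≤ idx < len in every call
  else 0

def sencode (msg : String) (key : Bool) : List Int :=
  let l : Int := (msg.length : Int)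
  let pwd : List Int :=
    (PySem.List.pyRange 0 l 4).foldl (fun pwd i =>
      pwd ++ [PySem.Int.bor (PySem.Int.bor (PySem.Int.bor (ordat msg i)
                (ordat msg (i + 1) <<< (8:Nat))) (ordat msg (i + 2) <<< (16:Nat)))
              (ordat msg (i + 3) <<< (24:Nat))]) []
  if key then pwd ++ [l] else pwd

-- ===== PORT B =====
def sencode_alt (msg : String) (key : Bool) : List Int :=
  -- total = 0; for c in reversed(msg): total = (total << 8) | ord(c)
  let total : Int :=
    msg.toList.reverse.foldl (fun t c => PySem.Int.bor (t <<< (8:Nat)) ((c.toNat : Int))) 0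
  -- for _ in range((len(msg)+3)//4): pwd.append(total & 0xFFFFFFFF); total >>= 32
  let st : List Int × Int :=
    (PySem.List.pyRange 0 (PySem.Int.floordiv ((msg.length : Int) + 3) 4) 1).foldl
      (fun st _ => (st.1 ++ [PySem.Int.band st.2 4294967295], st.2 >>> (32:Nat))) ([], total)
  if key then st.1 ++ [(msg.length : Int)] else st.1

-- ===== PRECONDITION & SPEC =====
def Spec_sencode (msg : String) (key : Bool) (out : List Int) : Prop := out = sencode_alt msg key
instance (msg : String) (key : Bool) (out : List Int) : Decidable (Spec_sencode msg key out) := by unfold Spec_sencode; infer_instance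

-- ===== CLAIM (what is proved, stated in full; the proofs are below) =====
def Claim_equal_sencode : Prop := ∀ (msg : String) (key : Bool), Dom_sencode msg key → Spec_sencode msg key (sencode msg key)

-- ===== LEMMAS AND PROOFS =====

-- little-endian value of a code list, one byte per code
def nval : List Nat → Nat
  | [] => 0
  | c :: r => c + 256 * nval r

-- the 32-bit words the packing produces, chunk-recursively
def wspec : List Nat → List Nat
  | [] => []
  | [a] => [a]
  | [a, b] => [a + 256 * b]
  | [a, b, c] => [a + 256 * b + 65536 * c]
  | a :: b :: c :: d :: r => (a + 256 * b + 65536 * c + 16777216 * d) :: wspec r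

-- disjoint-bits OR is addition
theorem lor_shift (k a b : Nat) (h : a < 2 ^ k) : a ||| (b <<< k) = a + b * 2 ^ k := by
  apply Nat.eq_of_testBit_eq
  intro i
  rw [Nat.testBit_lor, Nat.testBit_shiftLeft,
      show a + b * 2 ^ k = 2 ^ k * b + a by ring,
      Nat.testBit_two_pow_mul_add b h i]
  by_cases hi : i < k
  · simp [hi, Nat.not_le.mpr hi]
  · simp [hi, Nat.le_of_not_lt hi,
      Nat.testBit_lt_two_pow (lt_of_lt_of_le h (Nat.pow_le_pow_right (by norm_num) (Nat.le_of_not_lt hi)))]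

-- B's Horner fold computes nval
theorem horner_eq_nval (cs : List Nat) (h : ∀ c ∈ cs, c < 256) :
    cs.foldr (fun (c : Nat) (t : Int) => PySem.Int.bor (t <<< (8:Nat)) (c : Int)) 0
      = (nval cs : Int) := by
  induction cs with
  | nil => simp [nval]
  | cons c r ih =>
    have hr : ∀ x ∈ r, x < 256 := fun x hx => h x (List.mem_cons_of_mem _ hx)
    have hc : c < 256 := h c List.mem_cons_self
    rw [List.foldr_cons, ih hr, ← Int.natCast_shiftLeft, PySem.Int.bor_natCast]
    rw [Nat.lor_comm, lor_shift 8 c (nval r) (by omega)]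
    simp [nval]
    ring

-- the Python len helper: (n+3)//4 as a Nat
def nwords (cs : List Nat) : Nat := (cs.length + 3) / 4

-- fold with a body that ignores the loop variable is pure iteration
def extract : Nat → List Int × Int → List Int × Int
  | 0, st => st
  | n + 1, st => extract n (st.1 ++ [PySem.Int.band st.2 4294967295], st.2 >>> (32:Nat))

theorem foldl_const_body {α : Type} :
    ∀ (l : List α) (st : List Int × Int),
      l.foldl (fun (st : List Int × Int) _ =>
          (st.1 ++ [PySem.Int.band st.2 4294967295], st.2 >>> (32:Nat))) st
        = extract l.length st := by
  intro l
  induction l with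
  | nil => intro st; simp [extract]
  | cons x t ih => intro st; simp [List.foldl_cons, ih, extract]

theorem band_mask (m : Nat) : PySem.Int.band (m : Int) 4294967295 = ((m % 4294967296 : Nat) : Int) := by
  rw [show (4294967295 : Int) = ((4294967295 : Nat) : Int) by norm_num, PySem.Int.band_natCast,
      show (4294967295 : Nat) = 2 ^ 32 - 1 by norm_num, Nat.and_two_pow_sub_one_eq_mod]

-- the extraction loop turns nval back into the word list
theorem extract_nval (cs : List Nat) (h : ∀ c ∈ cs, c < 256) :
    ∀ acc : List Int,
      (extract (nwords cs) (acc, (nval cs : Int))).1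
        = acc ++ (wspec cs).map (fun w : Nat => (w : Int)) := by
  induction cs using wspec.induct with
  | case1 => intro acc; simp [nwords, extract, wspec]
  | case2 a =>
    intro acc
    have ha : a < 256 := h a List.mem_cons_self
    rw [show nwords [a] = 1 from by norm_num [nwords], extract]
    dsimp only
    rw [band_mask, show nval [a] % 4294967296 = a from by simp [nval]; omega]
    simp [extract, wspec]
  | case3 a b =>
    intro acc
    have ha : a < 256 := h a List.mem_cons_self
    have hb : b < 256 := h b (by simp)
    rw [show nwords [a, b] = 1 from by norm_num [nwords], extract]
    dsimp only
    rw [band_mask, show nval [a, b] % 4294967296 = a + 256 * b from by simp [nval]; omega]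
    simp [extract, wspec]
  | case4 a b c =>
    intro acc
    have ha : a < 256 := h a List.mem_cons_self
    have hb : b < 256 := h b (by simp)
    have hc : c < 256 := h c (by simp)
    rw [show nwords [a, b, c] = 1 from by norm_num [nwords], extract]
    dsimp only
    rw [band_mask, show nval [a, b, c] % 4294967296 = a + 256 * b + 65536 * c from by
      simp [nval]; omega]
    simp [extract, wspec]
  | case5 a b c d r ih =>
    intro acc
    have ha : a < 256 := h a List.mem_cons_self
    have hb : b < 256 := h b (by simp)
    have hc : c < 256 := h c (by simp)
    have hd : d < 256 := h d (by simp)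
    have hr : ∀ x ∈ r, x < 256 := fun x hx => h x (by simp [hx])
    have hq : nwords (a :: b :: c :: d :: r) = nwords r + 1 := by
      simp [nwords, List.length_cons]; omega
    have hsplit : nval (a :: b :: c :: d :: r)
        = (a + 256 * b + 65536 * c + 16777216 * d) + 4294967296 * nval r := by
      simp [nval]; ring
    have hwlt : a + 256 * b + 65536 * c + 16777216 * d < 4294967296 := by omega
    rw [hq]
    show (extract (nwords r + 1) (acc, (nval (a :: b :: c :: d :: r) : Int))).1 = _
    rw [extract]
    dsimp only
    rw [band_mask]
    have hmod : nval (a :: b :: c :: d :: r) % 4294967296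
        = a + 256 * b + 65536 * c + 16777216 * d := by
      rw [hsplit, Nat.add_mul_mod_self_left, Nat.mod_eq_of_lt hwlt]
    have hdiv : nval (a :: b :: c :: d :: r) >>> 32 = nval r := by
      rw [Nat.shiftRight_eq_div_pow, hsplit]
      rw [show (2:Nat)^32 = 4294967296 by norm_num]
      omega
    rw [← Int.natCast_shiftRight, hdiv, hmod, ih hr]
    simp [wspec]

-- the word A builds at 4k is the word of the k-th 4-chunk of the code list
theorem ordat_eq_getD (msg : String) (n : Nat) :
    ordat msg (n : Int) = (((msg.toList.map Char.toNat).getD n 0 : Nat) : Int) := by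
  unfold ordat
  by_cases h : n < msg.toList.length
  · have hlt : ((msg.length : Int) > (n : Int)) := by
      rw [← String.length_toList]; exact_mod_cast h
    rw [if_pos hlt]
    have hn : n < msg.length := by rw [← String.length_toList]; exact h
    simp [PySem.Str.pyGet?, PySem.Chars.pyGet?, PySem.List.pyGet?, PySem.List.pyIdx?,
      List.getD, hn]
  · have hge : ¬ ((msg.length : Int) > (n : Int)) := by
      rw [← String.length_toList]; omega
    rw [if_neg hge]
    simp [List.getD, List.getElem?_eq_none (by simpa using (by omega : msg.toList.length ≤ n))]

theorem wordA_eq (msg : String) (k : Nat)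
    (h : ∀ c ∈ msg.toList.map Char.toNat, c < 256) :
    PySem.Int.bor (PySem.Int.bor (PySem.Int.bor (ordat msg ((4 * k : Nat) : Int))
        (ordat msg (((4 * k : Nat) : Int) + 1) <<< (8:Nat)))
        (ordat msg (((4 * k : Nat) : Int) + 2) <<< (16:Nat)))
      (ordat msg (((4 * k : Nat) : Int) + 3) <<< (24:Nat))
    = ((let cs := msg.toList.map Char.toNat
        cs.getD (4 * k) 0 + 256 * cs.getD (4 * k + 1) 0
          + 65536 * cs.getD (4 * k + 2) 0 + 16777216 * cs.getD (4 * k + 3) 0 : Nat) : Int) := by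
  have hcast : ∀ j : Nat, (((4 * k : Nat) : Int) + (j : Nat)) = (((4 * k + j : Nat)) : Int) := by
    intro j; push_cast; ring
  have hb : ∀ j : Nat, (msg.toList.map Char.toNat).getD j 0 < 256 := by
    intro j
    rcases Nat.lt_or_ge j (msg.toList.map Char.toNat).length with hj | hj
    · exact h _ (by rw [List.getD_eq_getElem _ _ hj]; exact List.getElem_mem hj)
    · rw [List.getD_eq_default _ _ hj]; omega
  rw [show (((4 * k : Nat) : Int) + 1) = (((4 * k + 1 : Nat)) : Int) from hcast 1,
      show (((4 * k : Nat) : Int) + 2) = (((4 * k + 2 : Nat)) : Int) from hcast 2,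
      show (((4 * k : Nat) : Int) + 3) = (((4 * k + 3 : Nat)) : Int) from hcast 3,
      ordat_eq_getD, ordat_eq_getD, ordat_eq_getD, ordat_eq_getD]
  simp only [← Int.natCast_shiftLeft, PySem.Int.bor_natCast]
  rw [lor_shift 8 _ _ (by exact hb _),
      lor_shift 16 _ _ (by have := hb (4*k); have := hb (4*k+1); omega),
      lor_shift 24 _ _ (by have := hb (4*k); have := hb (4*k+1); have := hb (4*k+2); omega)]
  norm_num; ring

-- the chunk-recursive word list, written index-wise
theorem wspec_eq_range_map (cs : List Nat) :
    (wspec cs).map (fun w : Nat => (w : Int))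
      = (List.range (nwords cs)).map (fun k =>
          ((cs.getD (4 * k) 0 + 256 * cs.getD (4 * k + 1) 0
            + 65536 * cs.getD (4 * k + 2) 0 + 16777216 * cs.getD (4 * k + 3) 0 : Nat) : Int)) := by
  induction cs using wspec.induct with
  | case1 => simp [wspec, nwords]
  | case2 a => simp [wspec, nwords, List.range_succ, List.getD]
  | case3 a b => simp [wspec, nwords, List.range_succ, List.getD]
  | case4 a b c => simp [wspec, nwords, List.range_succ, List.getD]
  | case5 a b c d r ih =>
    have hq : nwords (a :: b :: c :: d :: r) = nwords r + 1 := by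
      simp [nwords, List.length_cons]; omega
    rw [wspec, hq, List.range_succ_eq_map]
    simp only [List.map_cons, List.map_map, ih]
    congr 1

theorem dom_codes_lt (msg : String) (hdom : pvDomStr msg = true) :
    ∀ c ∈ msg.toList.map Char.toNat, c < 256 := by
  intro c hc
  rw [List.mem_map] at hc
  obtain ⟨ch, hch, rfl⟩ := hc
  have := (List.all_eq_true.mp hdom) ch hch
  unfold pvDomChar at this
  simp only [Bool.or_eq_true, Bool.and_eq_true, decide_eq_true_eq, beq_iff_eq] at this
  omega

-- ===== VERDICT (by name: the statement is the Claim_ definition above) =====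
theorem sencode_spec : Claim_equal_sencode := by
  intro msg key hdom
  unfold Spec_sencode sencode sencode_alt
  dsimp only
  have h256 := dom_codes_lt msg hdom
  set cs := msg.toList.map Char.toNat with hcs
  have hlen : msg.length = cs.length := by rw [hcs, List.length_map, String.length_toList]
  -- B's accumulator is nval cs
  have htotal : msg.toList.reverse.foldl
      (fun t c => PySem.Int.bor (t <<< (8:Nat)) ((c.toNat : Int))) 0 = (nval cs : Int) := by
    rw [List.foldl_reverse]
    calc msg.toList.foldr (fun c t => PySem.Int.bor (t <<< (8:Nat)) ((c.toNat : Int))) 0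
        = (msg.toList.map Char.toNat).foldr
            (fun (c : Nat) (t : Int) => PySem.Int.bor (t <<< (8:Nat)) (c : Int)) 0 :=
          by rw [List.foldr_map]
      _ = (nval cs : Int) := horner_eq_nval cs h256
  -- B's loop count is nwords cs
  have hq : PySem.Int.floordiv ((msg.length : Int) + 3) 4 = ((nwords cs : Nat) : Int) := by
    rw [hlen, show ((cs.length : Int) + 3) = ((cs.length + 3 : Nat) : Int) by push_cast; ring]
    exact_mod_cast PySem.Int.floordiv_natCast (cs.length + 3) 4
  -- B's word list
  have hrangelen : (PySem.List.pyRange 0 ((nwords cs : Nat) : Int) 1).length = nwords cs := by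
    rw [PySem.List.pyRange_of_pos 0 ((nwords cs : Nat) : Int) (by norm_num)]
    rcases Nat.eq_zero_or_pos (nwords cs) with h0 | h0
    · simp [h0]
    · rw [if_pos (by exact_mod_cast h0)]
      simp only [List.length_map, List.length_range]
      norm_num
  have hB : ((PySem.List.pyRange 0 (PySem.Int.floordiv ((msg.length : Int) + 3) 4) 1).foldl
      (fun st _ => (st.1 ++ [PySem.Int.band st.2 4294967295], st.2 >>> (32:Nat)))
      ([], msg.toList.reverse.foldl
        (fun t c => PySem.Int.bor (t <<< (8:Nat)) ((c.toNat : Int))) 0)).1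
      = (wspec cs).map (fun w : Nat => (w : Int)) := by
    rw [htotal, hq, foldl_const_body, hrangelen]
    simpa using extract_nval cs h256 []
  -- A's word list
  have hA : (PySem.List.pyRange 0 ((msg.length : Int)) 4).foldl (fun pwd i =>
      pwd ++ [PySem.Int.bor (PySem.Int.bor (PySem.Int.bor (ordat msg i)
                (ordat msg (i + 1) <<< (8:Nat))) (ordat msg (i + 2) <<< (16:Nat)))
              (ordat msg (i + 3) <<< (24:Nat))]) []
      = (wspec cs).map (fun w : Nat => (w : Int)) := by
    rw [PySem.List.foldl_append_singleton_eq_map, List.nil_append]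
    rw [PySem.List.pyRange_of_pos 0 ((msg.length : Int)) (by norm_num)]
    have hif : (if (0 : Int) < (msg.length : Int)
        then (((msg.length : Int) - 0 + 4 - 1) / 4).toNat else 0) = nwords cs := by
      rcases Nat.eq_zero_or_pos msg.length with h0 | h0
      · rw [if_neg (by exact_mod_cast (by omega : ¬ (0:Int) < ((msg.length:Nat):Int)) )]
        simp [nwords, ← hlen, h0]
      · rw [if_pos (by exact_mod_cast h0), hlen]
        rw [show ((cs.length : Int) - 0 + 4 - 1) = ((cs.length + 3 : Nat) : Int) by push_cast; ring]
        rw [show ((cs.length + 3 : Nat) : Int) / 4 = (((cs.length + 3) / 4 : Nat) : Int) by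
          exact_mod_cast Int.natCast_div (cs.length + 3) 4]
        rw [Int.toNat_natCast]
        rfl
    rw [hif, List.map_map, wspec_eq_range_map]
    apply List.map_congr_left
    intro k _
    have h40 : ((0 : Int) + 4 * (k : Nat)) = (((4 * k : Nat)) : Int) := by push_cast; ring
    simp only [Function.comp, h40]
    exact wordA_eq msg k h256
  rw [hA, hB, hlen]
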